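-- pv_equiv track=rewrite | github.com/Secure-Embedded-Systems/rootcanal-ches2022 | example2/nga/bit1/unprotected/nga.py | detect_pipereg_output_names
-- ===== SOURCE A (Python) =====
-- all_pipe_names = ['writeback', 'memory', 'execute', 'decode']
--
-- pipe_width = {'decode': 64, 'execute': 188, 'memory': 146, 'writeback': 103} # from the rtl file five_stage_core.v
--
-- pipe_reg_stage_names = {'decode': "core_decode_pipe_pipe_reg_reg", 'execute': "core_execute_pipe_pipe_reg_reg",
--                         'memory': "core_memory_pipe_pipe_reg_reg", 'writeback': "core_writeback_pipe_pipe_reg_reg"}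
--
-- def detect_pipereg_output_names(gate_name_outp):
--     detected_pipereg_output_names = {}
--
--     for stg in all_pipe_names:
--         detected_pipereg_output_names[stg] = []
--
--         for bit in range(pipe_width[stg]):
--             pipe_reg_stage_name = pipe_reg_stage_names[stg]+'['+str(bit)+']'
--
--             if pipe_reg_stage_name in gate_name_outp.keys():
--                 outp_names = gate_name_outp[pipe_reg_stage_name]#.split('[')[0]
--                 for outp_name in outp_names:
--                     if outp_name not in detected_pipereg_output_names[stg]:
--                         detected_pipereg_output_names[stg].append(outp_name)
--
--     return detected_pipereg_output_names
-- ===== SOURCE B (Python) =====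
-- all_pipe_names = ['writeback', 'memory', 'execute', 'decode']
--
-- pipe_width = {'decode': 64, 'execute': 188, 'memory': 146, 'writeback': 103}
--
-- pipe_reg_stage_names = {'decode': "core_decode_pipe_pipe_reg_reg", 'execute': "core_execute_pipe_pipe_reg_reg",
--                         'memory': "core_memory_pipe_pipe_reg_reg", 'writeback': "core_writeback_pipe_pipe_reg_reg"}
--
-- # Precomputed index: register-bit name -> (stage, bit).  Built once, so the
-- # detection pass touches each input entry exactly once instead of probing
-- # every possible register-bit name against the input dict.
-- _pipereg_index = {pipe_reg_stage_names[s] + '[' + str(b) + ']': (s, b)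
--                   for s in all_pipe_names for b in range(pipe_width[s])}
--
-- def detect_pipereg_output_names(gate_name_outp):
--     bucket = {}
--     for key, outp_names in gate_name_outp.items():
--         hit = _pipereg_index.get(key)
--         if hit is not None and hit not in bucket:
--             bucket[hit] = outp_names
--     result = {}
--     for stg in all_pipe_names:
--         seen = []
--         for bit in sorted(b for (s, b) in bucket if s == stg):
--             for outp_name in bucket[(stg, bit)]:
--                 if outp_name not in seen:
--                     seen.append(outp_name)
--         result[stg] = seen
--     return result
-- ===== Notes on version B (the rewrite author's own statement) =====
-- stated objective: alternative
-- what changed: Instead of probing the input dict with every one of the 501 possible register-bit names (4 stages x width), B precomputes a name->(stage,bit) index once, makes a single pass over the input's items bucketing hits per (stage,bit), and then emits each stage's names in ascending bit order with first-seen dedup; it trades A's fixed 501 probes for one scan of what is actually present.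
import Mathlib
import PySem

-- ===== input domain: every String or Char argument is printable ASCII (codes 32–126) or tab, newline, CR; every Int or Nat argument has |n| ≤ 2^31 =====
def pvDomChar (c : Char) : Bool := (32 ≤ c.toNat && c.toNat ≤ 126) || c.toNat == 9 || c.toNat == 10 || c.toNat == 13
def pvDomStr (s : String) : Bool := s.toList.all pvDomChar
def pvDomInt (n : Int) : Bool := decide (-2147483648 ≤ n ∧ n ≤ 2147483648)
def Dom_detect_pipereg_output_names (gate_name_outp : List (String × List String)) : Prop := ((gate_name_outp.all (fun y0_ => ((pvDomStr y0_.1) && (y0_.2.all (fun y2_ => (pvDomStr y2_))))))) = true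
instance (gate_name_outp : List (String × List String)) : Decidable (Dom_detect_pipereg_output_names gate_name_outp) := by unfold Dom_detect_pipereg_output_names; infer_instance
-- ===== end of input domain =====

-- B replaces A's 501 probes of the input dict (one per possible register-bit name)
-- by a precomputed name->(stage,bit) index and a single bucketing pass over the
-- input's own items (an alternative algorithm of similar cost).

-- ===== PORT A =====
-- module constants shared by both versions
def pvAllPipeNames : List String := ["writeback", "memory", "execute", "decode"]

def pvPipeWidth : PySem.Dict String Int :=
  PySem.Dict.mk [("decode", 64), ("execute", 188), ("memory", 146), ("writeback", 103)]

def pvPipeRegStageNames : PySem.Dict String String :=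
  PySem.Dict.mk [("decode", "core_decode_pipe_pipe_reg_reg"), ("execute", "core_execute_pipe_pipe_reg_reg"),
                 ("memory", "core_memory_pipe_pipe_reg_reg"), ("writeback", "core_writeback_pipe_pipe_reg_reg")]

-- pref + '[' + str(bit) + ']'  (string concatenation, exact, expressed on the char lists)
def pvKey (pref : String) (bit : Int) : String :=
  String.ofList (pref.toList ++ '[' :: PySem.Int.toChars bit ++ [']'])

-- A's inner loop for one stage: probe every bit in range(width), append unseen names
-- (lookups pvPipeWidth/pvPipeRegStageNames use getD: every stage of all_pipe_names is present)
def pvCollectA (gate_name_outp : List (String × List String)) (stg : String) : List String :=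
  (PySem.List.pyRange 0 (pvPipeWidth.getD stg 0)).foldl (fun acc bit =>
    if (PySem.Dict.mk gate_name_outp).contains (pvKey (pvPipeRegStageNames.getD stg "") bit) then
      (((PySem.Dict.mk gate_name_outp).get? (pvKey (pvPipeRegStageNames.getD stg "") bit)).getD []).foldl
        (fun a n => if a.contains n then a else a ++ [n]) acc
    else acc) []

def detect_pipereg_output_names (gate_name_outp : List (String × List String)) : List (String × List String) :=
  pvAllPipeNames.foldl (fun det stg => det ++ [(stg, pvCollectA gate_name_outp stg)]) []

-- ===== PORT B =====
-- the precomputed index: register-bit name -> (stage, bit), built once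
def pvIndexList : List (String × (String × Int)) :=
  pvAllPipeNames.flatMap (fun s =>
    (PySem.List.pyRange 0 (pvPipeWidth.getD s 0)).map (fun b =>
      (pvKey (pvPipeRegStageNames.getD s "") b, (s, b))))

def pvIndex : PySem.Dict String (String × Int) :=
  pvIndexList.foldl (fun d p => d.insert p.1 p.2) PySem.Dict.empty

-- one pass over the input's items: bucket each hit under its (stage, bit), first one wins
def pvBucket (gate_name_outp : List (String × List String)) : PySem.Dict (String × Int) (List String) :=
  gate_name_outp.foldl (fun bk p =>
    match pvIndex.get? p.1 with
    | some hit => if bk.contains hit then bk else bk.insert hit p.2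
    | none => bk) PySem.Dict.empty

-- emit one stage: its buckets in ascending bit order, names deduped first-seen
def pvStageOut (bk : PySem.Dict (String × Int) (List String)) (stg : String) : List String :=
  (PySem.List.sorted (bk.keys.filterMap (fun sb => if sb.1 = stg then some sb.2 else none)) (fun x => x)).foldl
    (fun seen bit => (bk.getD (stg, bit) []).foldl (fun a n => if a.contains n then a else a ++ [n]) seen) []

def detect_pipereg_output_names_alt (gate_name_outp : List (String × List String)) : List (String × List String) :=
  let bk := pvBucket gate_name_outp
  pvAllPipeNames.foldl (fun res stg => res ++ [(stg, pvStageOut bk stg)]) []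

-- ===== PRECONDITION & SPEC =====
def Spec_detect_pipereg_output_names (gate_name_outp : List (String × List String)) (out : List (String × List String)) : Prop := out = detect_pipereg_output_names_alt gate_name_outp
instance (gate_name_outp : List (String × List String)) (out : List (String × List String)) : Decidable (Spec_detect_pipereg_output_names gate_name_outp out) := by unfold Spec_detect_pipereg_output_names; infer_instance

-- ===== CLAIM (what is proved, stated in full; the proofs are below) =====
def Claim_equal_detect_pipereg_output_names : Prop := ∀ (gate_name_outp : List (String × List String)), Dom_detect_pipereg_output_names gate_name_outp → Spec_detect_pipereg_output_names gate_name_outp (detect_pipereg_output_names gate_name_outp)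

-- ===== LEMMAS AND PROOFS =====
set_option maxRecDepth 8192

-- width and prefix of a stage, as proof-side abbreviations
def pvW (s : String) : Int := pvPipeWidth.getD s 0
def pvPref (s : String) : String := pvPipeRegStageNames.getD s ""

lemma pv_pyRange_cast (w : Int) (hw : 0 ≤ w) :
    PySem.List.pyRange 0 w = (List.range w.toNat).map (Nat.cast : Nat → Int) := by
  have := PySem.List.pyRange_zero_natCast w.toNat
  rwa [Int.toNat_of_nonneg hw] at this

lemma pv_pyRange_nodup (w : Int) (hw : 0 ≤ w) : (PySem.List.pyRange 0 w).Nodup := by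
  rw [pv_pyRange_cast w hw]
  exact List.nodup_range.map (fun a b h => by exact_mod_cast h)

lemma pv_pyRange_pairwise (w : Int) (hw : 0 ≤ w) :
    (PySem.List.pyRange 0 w).Pairwise (· < ·) := by
  rw [pv_pyRange_cast w hw]
  exact List.pairwise_lt_range.map Nat.cast (fun a b h => by exact_mod_cast h)

-- str(b) is injective on 0 ≤ b < 188 (covers every stage width)
lemma pv_toChars_inj {b b' : Int} (hb0 : 0 ≤ b) (hb : b < 188) (hb0' : 0 ≤ b') (hb' : b' < 188)
    (h : PySem.Int.toChars b = PySem.Int.toChars b') : b = b' := by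
  have H : ((List.range 188).map (fun k => PySem.Int.toChars (Int.ofNat k))).Nodup := by decide
  obtain ⟨n, rfl⟩ := Int.eq_ofNat_of_zero_le hb0
  obtain ⟨n', rfl⟩ := Int.eq_ofNat_of_zero_le hb0'
  have hn : n < 188 := by exact_mod_cast hb
  have hn' : n' < 188 := by exact_mod_cast hb'
  have e : ((List.range 188).map (fun k => PySem.Int.toChars (Int.ofNat k)))[n]'(by simpa using hn) =
           ((List.range 188).map (fun k => PySem.Int.toChars (Int.ofNat k)))[n']'(by simpa using hn') := by
    rw [List.getElem_map, List.getElem_map, List.getElem_range, List.getElem_range]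
    exact_mod_cast h
  have := (H.getElem_inj_iff).mp e
  exact_mod_cast this

-- the four stage prefixes differ within their first 6 characters
lemma pvKey_inj {s s' : String} (hs : s ∈ pvAllPipeNames) (hs' : s' ∈ pvAllPipeNames)
    {b b' : Int} (hb0 : 0 ≤ b) (hb : b < pvW s) (hb0' : 0 ≤ b') (hb' : b' < pvW s')
    (h : pvKey (pvPref s) b = pvKey (pvPref s') b') : s = s' ∧ b = b' := by
  have hl := congrArg String.toList h
  rw [pvKey, pvKey, String.toList_ofList, String.toList_ofList,
      List.append_assoc, List.append_assoc] at hl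
  simp only [pvAllPipeNames, List.mem_cons, List.not_mem_nil, or_false] at hs hs'
  rcases hs with rfl | rfl | rfl | rfl <;> rcases hs' with rfl | rfl | rfl | rfl <;>
  first
  | · refine ⟨rfl, ?_⟩
      have h2 := List.append_cancel_left hl
      have h3 := List.append_inj_left' h2 rfl
      rw [List.cons.injEq] at h3
      exact pv_toChars_inj hb0 (lt_of_lt_of_le hb (by decide)) hb0' (lt_of_lt_of_le hb' (by decide)) h3.2
  | · exfalso
      have ht := congrArg (List.take 6) hl
      rw [List.take_append_of_le_length (by decide), List.take_append_of_le_length (by decide)] at ht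
      exact absurd ht (by decide)

lemma pv_mem_indexList {k : String} {s : String} {b : Int}
    (h : (k, (s, b)) ∈ pvIndexList) : s ∈ pvAllPipeNames ∧ 0 ≤ b ∧ b < pvW s ∧ k = pvKey (pvPref s) b := by
  simp only [pvIndexList, List.mem_flatMap, List.mem_map] at h
  obtain ⟨s', hs', b', hb', he⟩ := h
  rw [Prod.mk.injEq, Prod.mk.injEq] at he
  obtain ⟨hk, hss, hbb⟩ := he
  subst hss hbb
  rw [PySem.List.mem_pyRange_one] at hb'
  exact ⟨hs', hb'.1, hb'.2, hk.symm⟩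

lemma pv_indexList_mem {s : String} {b : Int} (hs : s ∈ pvAllPipeNames) (hb0 : 0 ≤ b) (hb : b < pvW s) :
    (pvKey (pvPref s) b, (s, b)) ∈ pvIndexList := by
  simp only [pvIndexList, List.mem_flatMap, List.mem_map]
  exact ⟨s, hs, b, PySem.List.mem_pyRange_one.mpr ⟨hb0, hb⟩, rfl⟩

lemma pv_stage_w_nonneg {s : String} (hs : s ∈ pvAllPipeNames) : 0 ≤ pvW s := by
  simp only [pvAllPipeNames, List.mem_cons, List.not_mem_nil, or_false] at hs
  rcases hs with rfl | rfl | rfl | rfl <;> decide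

lemma pv_nodup_indexKeys : (pvIndexList.map Prod.fst).Nodup := by
  have he : pvIndexList.map Prod.fst =
      pvAllPipeNames.flatMap (fun s => (PySem.List.pyRange 0 (pvW s)).map (fun b => pvKey (pvPref s) b)) := by
    simp [pvIndexList, List.map_flatMap, List.map_map, Function.comp_def, pvW, pvPref]
  rw [he, List.nodup_flatMap]
  constructor
  · intro s hs
    apply List.Nodup.map_on ?_ (pv_pyRange_nodup _ (pv_stage_w_nonneg hs))
    intro x hx y hy hxy
    rw [PySem.List.mem_pyRange_one] at hx hy
    exact (pvKey_inj hs hs hx.1 hx.2 hy.1 hy.2 hxy).2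
  · have hd : ∀ s ∈ pvAllPipeNames, ∀ s' ∈ pvAllPipeNames, s ≠ s' →
        Function.onFun List.Disjoint (fun s => (PySem.List.pyRange 0 (pvW s)).map (fun b => pvKey (pvPref s) b)) s s' := by
      intro s hs s' hs' hne k hk hk'
      simp only [List.mem_map] at hk hk'
      obtain ⟨x, hx, rfl⟩ := hk
      obtain ⟨y, hy, he2⟩ := hk'
      rw [PySem.List.mem_pyRange_one] at hx hy
      exact hne ((pvKey_inj hs hs' hx.1 hx.2 hy.1 hy.2 he2.symm).1)
    have : pvAllPipeNames.Nodup := by decide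
    exact List.Pairwise.imp_of_mem (fun {a b} ha hb hne => hd a ha b hb hne)
      (this.imp_of_mem (fun ha hb h => h) |>.imp (fun h => h)) |>.imp (fun h => h)

lemma pv_foldl_insert_get? {κ ν : Type} [BEq κ] [LawfulBEq κ] (L : List (κ × ν)) (d : PySem.Dict κ ν)
    (hn : (L.map Prod.fst).Nodup) (k : κ) :
    (L.foldl (fun d p => d.insert p.1 p.2) d).get? k =
      ((PySem.Dict.mk L).get? k).orElse (fun _ => d.get? k) := by
  induction L generalizing d with
  | nil => rfl
  | cons p rest ih =>
    simp only [List.map_cons, List.nodup_cons] at hn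
    rw [List.foldl_cons, ih _ hn.2, PySem.Dict.get?_mk_cons]
    by_cases hk : p.1 = k
    · subst hk
      have hnone : (PySem.Dict.mk rest).get? p.1 = none := by
        rw [PySem.Dict.get?_eq_none_iff_not_mem_keys, PySem.Dict.keys_mk]
        exact hn.1
      rw [hnone, PySem.Dict.get?_insert_self]
      simp
    · rw [PySem.Dict.get?_insert_of_ne d p.2 (fun he => hk he.symm)]
      simp [hk]

lemma pv_index_get? (k : String) : pvIndex.get? k = (PySem.Dict.mk pvIndexList).get? k := by
  rw [pvIndex, pv_foldl_insert_get? _ _ pv_nodup_indexKeys, PySem.Dict.get?_empty]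
  cases (PySem.Dict.mk pvIndexList).get? k <;> rfl

lemma pv_index_sound {k : String} {s : String} {b : Int} (h : pvIndex.get? k = some (s, b)) :
    s ∈ pvAllPipeNames ∧ 0 ≤ b ∧ b < pvW s ∧ k = pvKey (pvPref s) b := by
  rw [pv_index_get?] at h
  exact pv_mem_indexList (PySem.Dict.mem_items_of_get?_eq_some _ h)

lemma pv_index_complete {s : String} {b : Int} (hs : s ∈ pvAllPipeNames) (hb0 : 0 ≤ b) (hb : b < pvW s) :
    pvIndex.get? (pvKey (pvPref s) b) = some (s, b) := by
  rw [pv_index_get?]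
  exact PySem.Dict.get?_of_mem_items (PySem.Dict.mk pvIndexList) (pv_indexList_mem hs hb0 hb)
    (by rw [PySem.Dict.keys_mk]; exact pv_nodup_indexKeys)

-- the bucket's lookup at a valid (stage, bit) is exactly A's first-match lookup of that bit's name
lemma pv_bucket_loop (g : List (String × List String)) :
    ∀ (bk0 : PySem.Dict (String × Int) (List String)) {s : String} {b : Int},
      s ∈ pvAllPipeNames → 0 ≤ b → b < pvW s →
      (g.foldl (fun bk p =>
          match pvIndex.get? p.1 with
          | some hit => if bk.contains hit then bk else bk.insert hit p.2
          | none => bk) bk0).get? (s, b) =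
        ((bk0.get? (s, b)).orElse (fun _ => (PySem.Dict.mk g).get? (pvKey (pvPref s) b))) := by
  induction g with
  | nil =>
    intro bk0 s b _ _ _
    cases h : bk0.get? (s, b) <;> rw [List.foldl_nil, h] <;> rfl
  | cons p rest ih =>
    intro bk0 s b hs hb0 hb
    rw [List.foldl_cons, PySem.Dict.get?_mk_cons]
    cases hidx : pvIndex.get? p.1 with
    | none =>
      have hne : (p.1 == pvKey (pvPref s) b) = false := by
        rw [beq_eq_false_iff_ne]
        intro he
        rw [he, pv_index_complete hs hb0 hb] at hidx
        simp at hidx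
      simp only [hne, Bool.false_eq_true, if_false]
      exact ih bk0 hs hb0 hb
    | some hit =>
      obtain ⟨s', b'⟩ := hit
      obtain ⟨hs', hb0', hb', hk⟩ := pv_index_sound hidx
      by_cases hpair : (s, b) = (s', b')
      · have hs2 : s = s' := congrArg Prod.fst hpair
        have hb2 : b = b' := congrArg Prod.snd hpair
        subst hs2; subst hb2
        have hkey : (p.1 == pvKey (pvPref s) b) = true := by rw [beq_iff_eq]; exact hk
        simp only [hkey, if_true]
        cases hc : bk0.contains (s, b)
        · have h0 : bk0.get? (s, b) = none := (PySem.Dict.get?_eq_none_iff_contains _ _).mpr hc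
          simp only [Bool.false_eq_true, if_false]
          rw [ih _ hs hb0 hb, PySem.Dict.get?_insert_self, h0]
          rfl
        · have h1 : ∃ v, bk0.get? (s, b) = some v := by
            cases h : bk0.get? (s, b) with
            | none => rw [(PySem.Dict.get?_eq_none_iff_contains _ _).mp h] at hc; exact absurd hc (by simp)
            | some v => exact ⟨v, rfl⟩
          obtain ⟨v, hv⟩ := h1
          simp only [if_true]
          rw [ih bk0 hs hb0 hb, hv]
          rfl
      · have hne : (p.1 == pvKey (pvPref s) b) = false := by
          rw [beq_eq_false_iff_ne]
          intro he
          rw [he] at hk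
          obtain ⟨e1, e2⟩ := pvKey_inj hs hs' hb0 hb hb0' hb' hk
          exact hpair (by rw [e1, e2])
        simp only [hne, Bool.false_eq_true, if_false]
        cases hc : bk0.contains (s', b')
        · simp only [Bool.false_eq_true, if_false]
          rw [ih _ hs hb0 hb, PySem.Dict.get?_insert_of_ne _ _ hpair]
        · simp only [if_true]
          exact ih bk0 hs hb0 hb

lemma pv_bucket_get? (g : List (String × List String)) {s : String} {b : Int}
    (hs : s ∈ pvAllPipeNames) (hb0 : 0 ≤ b) (hb : b < pvW s) :
    (pvBucket g).get? (s, b) = (PySem.Dict.mk g).get? (pvKey (pvPref s) b) := by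
  rw [pvBucket, pv_bucket_loop g PySem.Dict.empty hs hb0 hb, PySem.Dict.get?_empty]
  rfl

lemma pv_bucket_keys_valid (g : List (String × List String)) :
    ∀ p ∈ (pvBucket g).keys, p.1 ∈ pvAllPipeNames ∧ 0 ≤ p.2 ∧ p.2 < pvW p.1 := by
  rw [pvBucket]
  have : ∀ (bk0 : PySem.Dict (String × Int) (List String)),
      (∀ p ∈ bk0.keys, p.1 ∈ pvAllPipeNames ∧ 0 ≤ p.2 ∧ p.2 < pvW p.1) →
      ∀ p ∈ (g.foldl (fun bk p =>
          match pvIndex.get? p.1 with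
          | some hit => if bk.contains hit then bk else bk.insert hit p.2
          | none => bk) bk0).keys, p.1 ∈ pvAllPipeNames ∧ 0 ≤ p.2 ∧ p.2 < pvW p.1 := by
    induction g with
    | nil => intro bk0 h0; exact h0
    | cons q rest ih =>
      intro bk0 h0
      rw [List.foldl_cons]
      cases hidx : pvIndex.get? q.1 with
      | none => exact ih bk0 h0
      | some hit =>
        obtain ⟨s1, b1⟩ := hit
        rw [show (match (some (s1, b1) : Option (String × Int)) with
            | some h2 => if bk0.contains h2 = true then bk0 else bk0.insert h2 q.2
            | none => bk0) = if bk0.contains (s1, b1) = true then bk0 else bk0.insert (s1, b1) q.2 from rfl]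
        cases hc : bk0.contains (s1, b1)
        · simp only [Bool.false_eq_true, if_false]
          apply ih
          intro p hp
          rw [PySem.Dict.mem_keys_insert] at hp
          rcases hp with rfl | hp
          · obtain ⟨h1, h2, h3, _⟩ := pv_index_sound hidx
            exact ⟨h1, h2, h3⟩
          · exact h0 p hp
        · simp only [if_true]
          exact ih bk0 h0
  apply this
  intro p hp
  rw [PySem.Dict.keys_empty] at hp
  exact absurd hp (List.not_mem_nil)

lemma pv_bucket_keys_nodup (g : List (String × List String)) : (pvBucket g).keys.Nodup := by
  rw [pvBucket]
  have : ∀ (bk0 : PySem.Dict (String × Int) (List String)), bk0.keys.Nodup →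
      (g.foldl (fun bk p =>
          match pvIndex.get? p.1 with
          | some hit => if bk.contains hit then bk else bk.insert hit p.2
          | none => bk) bk0).keys.Nodup := by
    induction g with
    | nil => intro bk0 h0; exact h0
    | cons q rest ih =>
      intro bk0 h0
      rw [List.foldl_cons]
      cases hidx : pvIndex.get? q.1 with
      | none => exact ih bk0 h0
      | some hit =>
        rw [show (match (some hit : Option (String × Int)) with
            | some h2 => if bk0.contains h2 = true then bk0 else bk0.insert h2 q.2
            | none => bk0) = if bk0.contains hit = true then bk0 else bk0.insert hit q.2 from rfl]
        cases hc : bk0.contains hit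
        · simp only [Bool.false_eq_true, if_false]
          exact ih _ (PySem.Dict.nodup_keys_insert _ _ _ h0)
        · simp only [if_true]
          exact ih bk0 h0
  exact this PySem.Dict.empty PySem.Dict.nodup_keys_empty

lemma pv_foldl_skip_filter {α β : Type} (p : α → Bool) (step : β → α → β)
    (hskip : ∀ acc x, p x = false → step acc x = acc) (l : List α) (init : β) :
    l.foldl step init = (l.filter p).foldl step init := by
  induction l generalizing init with
  | nil => rfl
  | cons x rest ih =>
    rw [List.foldl_cons, List.filter_cons]
    cases hx : p x
    · rw [hskip init x hx]
      simpa using ih init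
    · simp only [if_pos]
      rw [List.foldl_cons, ih]

-- per-stage equality
lemma pv_stage_eq (g : List (String × List String)) {s : String} (hs : s ∈ pvAllPipeNames) :
    pvStageOut (pvBucket g) s = pvCollectA g s := by
  have hw0 : 0 ≤ pvW s := pv_stage_w_nonneg hs
  -- the sorted bucket bits are exactly the present bits of the range, in order
  have hsorted : PySem.List.sorted
      ((pvBucket g).keys.filterMap (fun sb => if sb.1 = s then some sb.2 else none)) (fun x => x) =
      (PySem.List.pyRange 0 (pvW s)).filter
        (fun b => (PySem.Dict.mk g).contains (pvKey (pvPref s) b)) := by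
    apply PySem.List.sorted_eq_of_perm_of_pairwise_lt
    · rw [List.perm_ext_iff_of_nodup]
      · intro b
        rw [List.mem_filter, PySem.List.mem_pyRange_one, List.mem_filterMap]
        constructor
        · rintro ⟨⟨hb0, hb⟩, hsome⟩
          refine ⟨(s, b), ?_, by simp⟩
          by_contra hnot
          have hnone := (PySem.Dict.get?_eq_none_iff_not_mem_keys (pvBucket g) (s, b)).mpr hnot
          rw [pv_bucket_get? g hs hb0 hb,
              (PySem.Dict.get?_eq_none_iff_contains _ _)] at hnone
          rw [hnone] at hsome
          exact Bool.noConfusion hsome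
        · rintro ⟨⟨s', b'⟩, hmem, hf⟩
          have hsb : s' = s ∧ b' = b := by
            by_cases hss : s' = s
            · simp [hss] at hf; exact ⟨hss, hf⟩
            · simp [hss] at hf
          rw [hsb.1, hsb.2] at hmem
          obtain ⟨_, hb0, hb⟩ := pv_bucket_keys_valid g (s, b) hmem
          refine ⟨⟨hb0, hb⟩, ?_⟩
          cases hcc : (PySem.Dict.mk g).contains (pvKey (pvPref s) b)
          · have hnone := (PySem.Dict.get?_eq_none_iff_contains
                (PySem.Dict.mk g) (pvKey (pvPref s) b)).mpr hcc
            rw [← pv_bucket_get? g hs hb0 hb,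
                PySem.Dict.get?_eq_none_iff_not_mem_keys] at hnone
            exact absurd hmem hnone
          · rfl
      · exact ((pv_pyRange_nodup _ hw0).filter _)
      · apply (pv_bucket_keys_nodup g).filterMap
        intro a a' b hb hb'
        have ha : a = (s, b) := by
          by_cases h1 : a.1 = s
          · simp [h1] at hb; exact Prod.ext h1 hb
          · simp [h1] at hb
        have ha' : a' = (s, b) := by
          by_cases h1 : a'.1 = s
          · simp [h1] at hb'; exact Prod.ext h1 hb'
          · simp [h1] at hb'
        rw [ha, ha']
    · exact (pv_pyRange_pairwise _ hw0).filter _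
  rw [pvStageOut, pvCollectA]
  rw [show PySem.List.pyRange 0 (pvPipeWidth.getD s 0) = PySem.List.pyRange 0 (pvW s) from rfl,
      show pvPipeRegStageNames.getD s "" = pvPref s from rfl]
  rw [hsorted]
  have h2 := pv_foldl_skip_filter (fun b => (PySem.Dict.mk g).contains (pvKey (pvPref s) b))
      (fun (acc : List String) bit =>
        if (PySem.Dict.mk g).contains (pvKey (pvPref s) bit) then
          (((PySem.Dict.mk g).get? (pvKey (pvPref s) bit)).getD []).foldl
            (fun a n => if a.contains n = true then a else a ++ [n]) acc
        else acc)
      (fun acc x hx => by simp only at hx; simp only [hx, Bool.false_eq_true, if_false]) (PySem.List.pyRange 0 (pvW s)) []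
  have h1 : ((PySem.List.pyRange 0 (pvW s)).filter
        (fun b => (PySem.Dict.mk g).contains (pvKey (pvPref s) b))).foldl
      (fun seen bit => ((pvBucket g).getD (s, bit) []).foldl
        (fun a n => if a.contains n = true then a else a ++ [n]) seen) [] =
      ((PySem.List.pyRange 0 (pvW s)).filter
        (fun b => (PySem.Dict.mk g).contains (pvKey (pvPref s) b))).foldl
      (fun (acc : List String) bit =>
        if (PySem.Dict.mk g).contains (pvKey (pvPref s) bit) then
          (((PySem.Dict.mk g).get? (pvKey (pvPref s) bit)).getD []).foldl
            (fun a n => if a.contains n = true then a else a ++ [n]) acc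
        else acc) [] := by
    apply PySem.List.foldl_congr_mem
    intro acc b hb
    rw [List.mem_filter, PySem.List.mem_pyRange_one] at hb
    obtain ⟨⟨hb0, hbw⟩, hc⟩ := hb
    rw [hc, if_pos rfl, PySem.Dict.getD_eq_get?_getD, pv_bucket_get? g hs hb0 hbw]
  exact h1.trans h2.symm

-- ===== VERDICT (by name: the statement is the Claim_ definition above) =====
theorem detect_pipereg_output_names_spec : Claim_equal_detect_pipereg_output_names := by
  intro g _
  unfold Spec_detect_pipereg_output_names detect_pipereg_output_names detect_pipereg_output_names_alt
  simp only [pvAllPipeNames, List.foldl]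
  rw [pv_stage_eq g (by simp [pvAllPipeNames]), pv_stage_eq g (by simp [pvAllPipeNames]),
      pv_stage_eq g (by simp [pvAllPipeNames]), pv_stage_eq g (by simp [pvAllPipeNames])]
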